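-- pv_equiv track=rewrite | github.com/tianyich/programs | CMU Prec/hw11.py | generateLetterString
-- ===== SOURCE A (Python) =====
-- def generateLetterString(s):
--     if(len(s))!=2:
--         return ""
--     if (s[0]==s[1]):#base case
--         return s[0]
--     elif ord(s[0])<ord(s[1]):#forward
--         newStr=chr(ord(s[0])+1)+s[1]
--         return s[0]+generateLetterString(newStr)
--     elif ord(s[0])>ord(s[1]):#backward
--         newStr=chr(ord(s[0])-1)+s[1]
--         return s[0]+generateLetterString(newStr)
-- ===== SOURCE B (Python) =====
-- def generateLetterString(s):
--     if len(s) != 2: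
--         return ""
--     a, b = ord(s[0]), ord(s[1])
--     if a <= b:
--         return ''.join(map(chr, range(a, b + 1)))
--     return ''.join(map(chr, reversed(range(b, a + 1))))
-- ===== Notes on version B (the rewrite author's own statement) =====
-- stated objective: simpler
-- what changed: Replaces the right-associated recursion with repeated string concatenation by a single forward (or reversed) pass over the inclusive character-code range joined once.
import Mathlib
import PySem

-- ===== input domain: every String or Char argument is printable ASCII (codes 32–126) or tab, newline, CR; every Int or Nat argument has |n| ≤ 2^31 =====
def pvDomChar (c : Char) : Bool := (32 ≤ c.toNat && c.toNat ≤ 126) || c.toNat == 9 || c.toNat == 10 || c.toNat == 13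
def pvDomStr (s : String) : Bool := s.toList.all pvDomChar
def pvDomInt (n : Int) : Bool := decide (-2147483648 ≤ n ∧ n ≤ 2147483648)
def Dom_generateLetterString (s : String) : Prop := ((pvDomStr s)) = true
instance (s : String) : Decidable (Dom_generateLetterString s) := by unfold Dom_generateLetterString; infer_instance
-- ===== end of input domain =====

-- B replaces A's right-associated recursion (repeated string concatenation) by one linear
-- forward/reversed pass over the inclusive code range joined once. Return value only; no mutation.

-- ===== PORT A =====
-- A's recursion, tracked on the character CODES (ord s[0], ord s[1]); chr is applied once at
-- the end instead of at each step (A re-packs the same codes into a 2-char string each call).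
-- Branches in A's order: equal (base case), forward (ord+1), backward (ord-1).
def pvGlsRec (a b : Nat) : List Nat :=
  if a = b then [a]
  else if a < b then a :: pvGlsRec (a + 1) b
  else a :: pvGlsRec (a - 1) b
termination_by b - a + (a - b)
decreasing_by
  all_goals omega

def generateLetterString (s : String) : String :=
  match s.toList with
  | [c0, c1] => String.ofList ((pvGlsRec c0.toNat c1.toNat).map Char.ofNat)
  | _ => ""  -- len(s) != 2

-- ===== PORT B =====
-- len(s) != 2 guard, then a = ord(s[0]), b = ord(s[1]) (s[0]/s[1] on a known 2-char list
-- are head/last); range(a, b+1) over the Nat codes ports as List.range' a (b+1-a) (ords ≥ 0);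
-- reversed(...) is .reverse; ''.join(map(chr, ...)) is .map Char.ofNat joined by String.ofList.
def generateLetterString_alt (s : String) : String :=
  if s.toList.length ≠ 2 then ""
  else
    let a := (s.toList.headD default).toNat
    let b := (s.toList.getLastD default).toNat
    if a ≤ b then String.ofList ((List.range' a (b + 1 - a)).map Char.ofNat)
    else String.ofList (((List.range' b (a + 1 - b)).map Char.ofNat).reverse)

-- ===== PRECONDITION & SPEC =====
def Spec_generateLetterString (s : String) (out : String) : Prop := out = generateLetterString_alt s
instance (s : String) (out : String) : Decidable (Spec_generateLetterString s out) := by unfold Spec_generateLetterString; infer_instance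

-- ===== CLAIM (what is proved, stated in full; the proofs are below) =====
def Claim_equal_generateLetterString : Prop := ∀ (s : String), Dom_generateLetterString s → Spec_generateLetterString s (generateLetterString s)

-- ===== LEMMAS AND PROOFS =====

-- A's ascending branch produces exactly the inclusive forward code range.
theorem pvGlsRec_up (n : Nat) : ∀ a b : Nat, b - a = n → a ≤ b →
    pvGlsRec a b = List.range' a (b - a + 1) := by
  induction n with
  | zero =>
    intro a b h hle
    have : a = b := by omega
    subst this
    rw [pvGlsRec]
    simp [List.range']
  | succ k ih =>
    intro a b h hle
    have hlt : a < b := by omega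
    rw [pvGlsRec]
    simp only [if_neg (by omega : ¬ a = b), if_pos hlt]
    rw [ih (a + 1) b (by omega) (by omega),
        show b - a + 1 = (b - (a + 1) + 1) + 1 from by omega]
    simp [List.range']

-- A's descending branch produces the reversed inclusive code range.
theorem pvGlsRec_down (n : Nat) : ∀ a b : Nat, a - b = n → b < a →
    pvGlsRec a b = (List.range' b (a - b + 1)).reverse := by
  induction n with
  | zero => intro a b h hlt; omega
  | succ k ih =>
    intro a b h hlt
    rw [pvGlsRec]
    simp only [if_neg (by omega : ¬ a = b), if_neg (by omega : ¬ a < b)]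
    by_cases hd : a - 1 = b
    · have ha : a = b + 1 := by omega
      subst ha
      simp [pvGlsRec, List.range']
    · rw [ih (a - 1) b (by omega) (by omega),
          show a - 1 - b + 1 = a - b from by omega,
          show a - b + 1 = (a - b) + 1 from rfl, List.range'_concat]
      simp
      omega

theorem generateLetterString_eq_alt (s : String) :
    generateLetterString s = generateLetterString_alt s := by
  unfold generateLetterString generateLetterString_alt
  cases hs : s.toList with
  | nil => simp
  | cons c0 t =>
    cases t with
    | nil => simp
    | cons c1 t2 =>
      cases t2 with
      | cons _ _ => simp
      | nil =>
        rw [if_neg (by simp)]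
        simp only [List.headD_cons, List.getLastD, List.getLast]
        by_cases hle : c0.toNat ≤ c1.toNat
        · rw [if_pos hle, pvGlsRec_up (c1.toNat - c0.toNat) _ _ rfl hle,
              show c1.toNat + 1 - c0.toNat = c1.toNat - c0.toNat + 1 from by omega]
        · rw [if_neg hle, pvGlsRec_down (c0.toNat - c1.toNat) _ _ rfl (by omega),
              show c0.toNat + 1 - c1.toNat = c0.toNat - c1.toNat + 1 from by omega,
              List.map_reverse]

-- ===== VERDICT (by name: the statement is the Claim_ definition above) =====
theorem generateLetterString_spec : Claim_equal_generateLetterString :=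
  fun s _ => generateLetterString_eq_alt s
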